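-- pv_equiv track=rewrite | github.com/jag1g13/pycgtool | pycgtool/util.py | extend_graph_chain
-- ===== SOURCE A (Python) =====
-- def extend_graph_chain(extend, pairs):
--     """
--     Take list of tuples representing chained links in an undirected graph and extend the chain length.
--
--     :param extend: List of link tuples to extend
--     :param pairs: Graph edges as list of tuples
--     :return: List of link tuples for chain length one greater than input
--     """
--     ret = []
--
--     def append_if_not_in(lst, item):
--         if item not in lst and item[::-1] not in lst:
--             lst.append(item)
--
--     for chain in extend:
--         for _ in range(2):
--             node1, node2 = chain[-2:]
--             spare = chain[:-2]
--
--             for pair2 in pairs: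
--                 if node2 == pair2[0] and pair2[1] not in chain:
--                     append_if_not_in(ret, spare + (node1, node2, pair2[1]))
--                 elif node2 == pair2[1] and pair2[0] not in chain:
--                     append_if_not_in(ret, spare + (node1, node2, pair2[0]))
--
--             try:
--                 # Support GROMACS RTP + to link to next residue
--                 if node2.startswith("+"):
--                     for pair2 in pairs:
--                         if node2.strip("+") == pair2[0] and "+" + pair2[1] not in chain:
--                             append_if_not_in(ret, spare + (node1, node2, "+" + pair2[1]))
--                         elif node2.strip("+") == pair2[1] and "+" + pair2[0] not in chain:
--                             append_if_not_in(ret, spare + (node1, node2, "+" + pair2[0]))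
--             except AttributeError:
--                 pass
--
--             # Reverse and look for links at the start of the chain
--             chain = chain[::-1]
--
--     return ret
-- ===== SOURCE B (Python) =====
-- def extend_graph_chain(extend, pairs):
--     """
--     Take list of tuples representing chained links in an undirected graph and extend the chain length.
--
--     :param extend: List of link tuples to extend
--     :param pairs: Graph edges as list of tuples
--     :return: List of link tuples for chain length one greater than input
--     """
--     # Build adjacency index once: node -> neighbours in pair order (one entry for a self-loop)
--     adj = {}
--     for a, b in pairs:
--         adj.setdefault(a, []).append(b)
--         if a != b:
--             adj.setdefault(b, []).append(a)
--
--     ret = []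
--
--     def append_if_not_in(lst, item):
--         if item not in lst and item[::-1] not in lst:
--             lst.append(item)
--
--     for chain in extend:
--         for _ in range(2):
--             node1, node2 = chain[-2:]
--             spare = chain[:-2]
--
--             cands = [x for x in adj.get(node2, []) if x not in chain]
--             try:
--                 # Support GROMACS RTP + to link to next residue
--                 if node2.startswith("+"):
--                     cands += ["+" + x for x in adj.get(node2.strip("+"), [])
--                               if "+" + x not in chain]
--             except AttributeError:
--                 pass
--
--             for c in cands:
--                 append_if_not_in(ret, spare + (node1, node2, c))
--
--             # Reverse and look for links at the start of the chain
--             chain = chain[::-1]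
--
--     return ret
-- ===== Notes on version B (the rewrite author's own statement) =====
-- stated objective: faster
-- what changed: B builds an adjacency dict (node -> neighbours in pair order, one entry per self-loop) once, then each chain step looks up the last node's neighbours (and, for '+'-prefixed nodes, the stripped node's neighbours prefixed with '+') instead of A's full scans over all pairs, keeping the same not-in-chain filters and reverse-dedup append.
import Mathlib
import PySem

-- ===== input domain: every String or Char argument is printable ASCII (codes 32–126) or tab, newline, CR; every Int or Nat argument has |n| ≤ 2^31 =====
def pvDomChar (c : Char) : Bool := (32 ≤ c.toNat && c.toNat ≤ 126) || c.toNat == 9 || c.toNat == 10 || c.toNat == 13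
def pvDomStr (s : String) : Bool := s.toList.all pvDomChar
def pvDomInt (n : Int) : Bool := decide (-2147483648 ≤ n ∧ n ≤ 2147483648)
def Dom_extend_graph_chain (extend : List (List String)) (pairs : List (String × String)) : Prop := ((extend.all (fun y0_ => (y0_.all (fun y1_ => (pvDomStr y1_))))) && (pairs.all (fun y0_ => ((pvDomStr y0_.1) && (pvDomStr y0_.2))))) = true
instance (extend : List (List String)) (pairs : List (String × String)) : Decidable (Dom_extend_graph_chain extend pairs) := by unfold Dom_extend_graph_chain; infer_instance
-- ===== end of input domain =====

-- ===== PORT A =====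
-- B replaces A's two O(|pairs|) inner scans per chain step by one adjacency-dict lookup
-- (objective: faster, constant work per chain step after an O(|pairs|) index build).
-- Python A mutates nothing observable; equivalence is about the return value.

-- shared helper: the nested `append_if_not_in` (identical line in both Python sources)
def appendIfNotIn (lst : List (List String)) (item : List String) : List (List String) :=
  if !(lst.contains item) && !(lst.contains item.reverse) then lst ++ [item] else lst

-- body of A's `for _ in range(2)` loop for one orientation of `chain`
def pvOnceA (pairs : List (String × String)) (ret : List (List String))
    (chain : List String) : List (List String) :=
  match PySem.List.slice chain (some (-2)) none with   -- node1, node2 = chain[-2:]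
  | [node1, node2] =>
    let spare := PySem.List.slice chain none (some (-2))
    let ret := pairs.foldl (fun ret p =>
      if node2 == p.1 && !(chain.contains p.2) then
        appendIfNotIn ret (spare ++ [node1, node2, p.2])
      else if node2 == p.2 && !(chain.contains p.1) then
        appendIfNotIn ret (spare ++ [node1, node2, p.1])
      else ret) ret
    -- nodes are always strings here, so the AttributeError guard never fires
    if PySem.Str.startswith node2 "+" then
      pairs.foldl (fun ret p =>
        if PySem.Str.stripChars node2 "+" == p.1 && !(chain.contains ("+" ++ p.2)) then
          appendIfNotIn ret (spare ++ [node1, node2, "+" ++ p.2])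
        else if PySem.Str.stripChars node2 "+" == p.2 && !(chain.contains ("+" ++ p.1)) then
          appendIfNotIn ret (spare ++ [node1, node2, "+" ++ p.1])
        else ret) ret
    else ret
  | _ => ret   -- Python raises ValueError (unpacking) here; excluded by Pre_

def extend_graph_chain (extend : List (List String)) (pairs : List (String × String)) : List (List String) :=
  extend.foldl (fun ret chain =>
    -- `for _ in range(2)` unrolled: second pass uses chain[::-1] (= reverse)
    pvOnceA pairs (pvOnceA pairs ret chain) chain.reverse) []

-- ===== PORT B =====
-- adj.setdefault(a, []).append(b); if a != b: adj.setdefault(b, []).append(a)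
def pvBuildAdj (pairs : List (String × String)) : PySem.Dict String (List String) :=
  pairs.foldl (fun adj p =>
    let adj := adj.modify p.1 [] (fun l => l ++ [p.2])
    if p.1 == p.2 then adj else adj.modify p.2 [] (fun l => l ++ [p.1])) PySem.Dict.empty

-- body of B's `for _ in range(2)` loop for one orientation of `chain`
def pvOnceB (adj : PySem.Dict String (List String)) (ret : List (List String))
    (chain : List String) : List (List String) :=
  match PySem.List.slice chain (some (-2)) none with   -- node1, node2 = chain[-2:]
  | [node1, node2] =>
    let spare := PySem.List.slice chain none (some (-2))
    let cands := (adj.getD node2 []).filter (fun x => !(chain.contains x))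
    let cands := if PySem.Str.startswith node2 "+" then
        cands ++ ((adj.getD (PySem.Str.stripChars node2 "+") []).map
                    (fun x => "+" ++ x)).filter (fun x => !(chain.contains x))
      else cands
    cands.foldl (fun ret c => appendIfNotIn ret (spare ++ [node1, node2, c])) ret
  | _ => ret   -- Python raises ValueError (unpacking) here; excluded by Pre_

def extend_graph_chain_alt (extend : List (List String)) (pairs : List (String × String)) : List (List String) :=
  let adj := pvBuildAdj pairs
  extend.foldl (fun ret chain =>
    pvOnceB adj (pvOnceB adj ret chain) chain.reverse) []

-- ===== PRECONDITION & SPEC =====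
-- Pre_ excludes only inputs where both Pythons RAISE: a chain with fewer than two nodes
-- makes `node1, node2 = chain[-2:]` raise ValueError.
def Pre_extend_graph_chain (extend : List (List String)) (pairs : List (String × String)) : Prop :=
  ∀ c ∈ extend, 2 ≤ c.length
instance (extend : List (List String)) (pairs : List (String × String)) : Decidable (Pre_extend_graph_chain extend pairs) := by unfold Pre_extend_graph_chain; infer_instance
def pvWitness_extend_graph_chain : List (List String) × (List (String × String)) :=
  ([["a", "b"], ["+a", "+b+"]], [("b", "c"), ("b", "b"), ("a", "b")])
def Spec_extend_graph_chain (extend : List (List String)) (pairs : List (String × String)) (out : List (List String)) : Prop := out = extend_graph_chain_alt extend pairs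
instance (extend : List (List String)) (pairs : List (String × String)) (out : List (List String)) : Decidable (Spec_extend_graph_chain extend pairs out) := by unfold Spec_extend_graph_chain; infer_instance

-- ===== CLAIM (what is proved, stated in full; the proofs are below) =====
def Claim_equal_extend_graph_chain : Prop := ∀ (extend : List (List String)) (pairs : List (String × String)), Dom_extend_graph_chain extend pairs → Pre_extend_graph_chain extend pairs → Spec_extend_graph_chain extend pairs (extend_graph_chain extend pairs)

-- ===== LEMMAS AND PROOFS =====

-- neighbours a single pair contributes to node n (one entry for a self-loop)
def pvNeigh (n : String) (p : String × String) : List String :=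
  if p.1 = p.2 then (if n = p.1 then [p.2] else [])
  else if n = p.1 then [p.2] else if n = p.2 then [p.1] else []

theorem pvBuildAdj_step (d : PySem.Dict String (List String)) (p : String × String) (n : String) :
    ((let d1 := d.modify p.1 [] (fun l => l ++ [p.2]);
      if p.1 == p.2 then d1 else d1.modify p.2 [] (fun l => l ++ [p.1])).getD n [])
      = d.getD n [] ++ pvNeigh n p := by
  obtain ⟨a, b⟩ := p
  simp only [pvNeigh, beq_iff_eq]
  by_cases hab : a = b
  · subst hab
    simp only [if_true]
    by_cases hn : n = a
    · subst hn; rw [PySem.Dict.getD_modify_self]; simp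
    · rw [PySem.Dict.getD_modify_of_ne _ _ _ hn]; simp [hn]
  · simp only [if_neg hab]
    by_cases hn2 : n = b
    · subst hn2
      rw [PySem.Dict.getD_modify_self, PySem.Dict.getD_modify_of_ne _ _ _ (fun h => hab h.symm)]
      have hba : ¬ (n = a) := fun h => hab h.symm
      simp [hba]
    · by_cases hn1 : n = a
      · subst hn1
        rw [PySem.Dict.getD_modify_of_ne _ _ _ hn2, PySem.Dict.getD_modify_self]
        simp
      · rw [PySem.Dict.getD_modify_of_ne _ _ _ hn2, PySem.Dict.getD_modify_of_ne _ _ _ hn1]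
        simp [hn1, hn2]

theorem pvBuildAdj_aux (pairs : List (String × String)) (d : PySem.Dict String (List String)) (n : String) :
    (pairs.foldl (fun adj p =>
      let adj := adj.modify p.1 [] (fun l => l ++ [p.2])
      if p.1 == p.2 then adj else adj.modify p.2 [] (fun l => l ++ [p.1])) d).getD n []
    = d.getD n [] ++ pairs.flatMap (pvNeigh n) := by
  induction pairs generalizing d with
  | nil => simp
  | cons p ps ih =>
    simp only [List.foldl_cons, List.flatMap_cons]
    rw [ih, pvBuildAdj_step]
    simp [List.append_assoc]

theorem pvBuildAdj_getD (pairs : List (String × String)) (n : String) :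
    (pvBuildAdj pairs).getD n [] = pairs.flatMap (pvNeigh n) := by
  unfold pvBuildAdj
  rw [pvBuildAdj_aux]
  simp [PySem.Dict.empty, PySem.Dict.getD, PySem.Dict.get?]

-- one pair's contribution in A's plain scan = folding its filtered neighbour list
theorem pvStep_plain (n2 : String) (chain : List String)
    (app : List (List String) → String → List (List String)) (p : String × String)
    (ret : List (List String)) :
    (if n2 == p.1 && !(chain.contains p.2) then app ret p.2
     else if n2 == p.2 && !(chain.contains p.1) then app ret p.1
     else ret)
    = ((pvNeigh n2 p).filter (fun x => !(chain.contains x))).foldl app ret := by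
  obtain ⟨a, b⟩ := p
  simp only [pvNeigh]
  by_cases hab : a = b
  · rw [hab]
    by_cases hn : n2 = b
    · by_cases hm : b ∈ chain <;> simp [hn, hm]
    · simp [hn]
  · by_cases hn1 : n2 = a
    · have hn2 : ¬ n2 = b := fun h => hab (hn1.symm.trans h)
      by_cases hm : b ∈ chain <;> simp [hn1, hab, hm]
    · by_cases hn2 : n2 = b
      · have hba : ¬ b = a := fun h => hab h.symm
        by_cases hm : a ∈ chain <;> simp [hn2, hab, hba, hm]
      · simp [hn1, hn2, hab]

-- one pair's contribution in A's "+"-scan = folding its mapped-and-filtered neighbour list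
theorem pvStep_plus (s : String) (chain : List String)
    (app : List (List String) → String → List (List String)) (p : String × String)
    (ret : List (List String)) :
    (if s == p.1 && !(chain.contains ("+" ++ p.2)) then app ret ("+" ++ p.2)
     else if s == p.2 && !(chain.contains ("+" ++ p.1)) then app ret ("+" ++ p.1)
     else ret)
    = (((pvNeigh s p).map (fun x => "+" ++ x)).filter (fun x => !(chain.contains x))).foldl app ret := by
  obtain ⟨a, b⟩ := p
  simp only [pvNeigh]
  by_cases hab : a = b
  · rw [hab]
    by_cases hn : s = b
    · by_cases hm : ("+" ++ b) ∈ chain <;> simp [hn, hm]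
    · simp [hn]
  · by_cases hn1 : s = a
    · have hn2 : ¬ s = b := fun h => hab (hn1.symm.trans h)
      by_cases hm : ("+" ++ b) ∈ chain <;> simp [hn1, hab, hm]
    · by_cases hn2 : s = b
      · have hba : ¬ b = a := fun h => hab h.symm
        by_cases hm : ("+" ++ a) ∈ chain <;> simp [hn2, hab, hba, hm]
      · simp [hn1, hn2, hab]

theorem pvFold_plain (n2 : String) (chain : List String)
    (app : List (List String) → String → List (List String))
    (pairs : List (String × String)) (ret : List (List String)) :
    pairs.foldl (fun ret p =>
      if n2 == p.1 && !(chain.contains p.2) then app ret p.2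
      else if n2 == p.2 && !(chain.contains p.1) then app ret p.1
      else ret) ret
    = ((pairs.flatMap (pvNeigh n2)).filter (fun x => !(chain.contains x))).foldl app ret := by
  induction pairs generalizing ret with
  | nil => simp
  | cons p ps ih =>
    simp only [List.foldl_cons, List.flatMap_cons, List.filter_append, List.foldl_append]
    rw [ih]
    congr 1
    exact pvStep_plain n2 chain app p ret

theorem pvFold_plus (s : String) (chain : List String)
    (app : List (List String) → String → List (List String))
    (pairs : List (String × String)) (ret : List (List String)) :
    pairs.foldl (fun ret p =>
      if s == p.1 && !(chain.contains ("+" ++ p.2)) then app ret ("+" ++ p.2)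
      else if s == p.2 && !(chain.contains ("+" ++ p.1)) then app ret ("+" ++ p.1)
      else ret) ret
    = (((pairs.flatMap (pvNeigh s)).map (fun x => "+" ++ x)).filter
        (fun x => !(chain.contains x))).foldl app ret := by
  induction pairs generalizing ret with
  | nil => simp
  | cons p ps ih =>
    simp only [List.foldl_cons, List.flatMap_cons, List.map_append, List.filter_append,
      List.foldl_append]
    rw [ih]
    congr 1
    exact pvStep_plus s chain app p ret

theorem pvOnce_eq (pairs : List (String × String)) (ret : List (List String)) (chain : List String) :
    pvOnceA pairs ret chain = pvOnceB (pvBuildAdj pairs) ret chain := by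
  unfold pvOnceA pvOnceB
  cases hs : PySem.List.slice chain (some (-2)) none with
  | nil => rfl
  | cons x t =>
    cases t with
    | nil => rfl
    | cons y t2 =>
      cases t2 with
      | cons z t3 => rfl
      | nil =>
        simp only [pvBuildAdj_getD]
        rw [pvFold_plain y chain
          (fun ret c => appendIfNotIn ret (PySem.List.slice chain none (some (-2)) ++ [x, y, c]))
          pairs ret]
        by_cases hplus : PySem.Str.startswith y "+" = true
        · rw [if_pos hplus, if_pos hplus, List.foldl_append,
            pvFold_plus (PySem.Str.stripChars y "+") chain
              (fun ret c => appendIfNotIn ret (PySem.List.slice chain none (some (-2)) ++ [x, y, c]))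
              pairs]
        · rw [if_neg hplus, if_neg hplus]

theorem pvPorts_eq (extend : List (List String)) (pairs : List (String × String)) :
    extend_graph_chain extend pairs = extend_graph_chain_alt extend pairs := by
  unfold extend_graph_chain extend_graph_chain_alt
  apply PySem.List.foldl_congr_mem
  intro acc c _
  rw [pvOnce_eq, pvOnce_eq]

-- ===== VERDICT (by name: the statement is the Claim_ definition above) =====
theorem extend_graph_chain_spec : Claim_equal_extend_graph_chain := by
  intro extend pairs _ _
  unfold Spec_extend_graph_chain
  exact pvPorts_eq extend pairs
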